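-- pv_equiv track=rewrite | github.com/mianzhang/DSNER | main.py | cal_metrics
-- ===== SOURCE A (Python) =====
-- def cal_metrics(pred_paths, gold_paths):
--
--     def get_name_entities(path):
--         length = len(path)
--         name_entitis = set()
--         i = 0
--         while i < length:
--             cur_tag = path[i]
--             if cur_tag.startswith('B-'):
--                 tag = cur_tag[2:]
--                 in_tag = cur_tag.replace('B', 'I')
--                 j = i + 1
--                 while j < length and path[j] == in_tag:
--                     j += 1
--                 name_entitis.add(tag + "-" + str(i) + "-" + str(j))
--                 i = j
--             else:
--                 i += 1
--         return name_entitis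
--
--     tp, tp_fp, tp_fn = 0, 0, 0
--     for pred_path, gold_path in zip(pred_paths, gold_paths):
--         pred_nes = get_name_entities(pred_path)
--         gold_nes = get_name_entities(gold_path)
--         tp += len(pred_nes.intersection(gold_nes))
--         tp_fp += len(pred_nes)
--         tp_fn += len(gold_nes)
--
--     return tp, tp_fp, tp_fn
-- ===== SOURCE B (Python) =====
-- def cal_metrics(pred_paths, gold_paths):
--
--     def get_name_entities(path):
--         entities = set()
--         open_ent = None  # (in_tag, tag, start)
--         for k, t in enumerate(path):
--             if open_ent is not None:
--                 in_tag, tag, start = open_ent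
--                 if t == in_tag:
--                     continue
--                 entities.add(tag + "-" + str(start) + "-" + str(k))
--                 open_ent = None
--             if t.startswith('B-'):
--                 open_ent = (t.replace('B', 'I'), t[2:], k)
--         if open_ent is not None:
--             in_tag, tag, start = open_ent
--             entities.add(tag + "-" + str(start) + "-" + str(len(path)))
--         return entities
--
--     tp, tp_fp, tp_fn = 0, 0, 0
--     for pred_path, gold_path in zip(pred_paths, gold_paths):
--         pred_nes = get_name_entities(pred_path)
--         gold_nes = get_name_entities(gold_path)
--         tp += len(pred_nes.intersection(gold_nes))
--         tp_fp += len(pred_nes)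
--         tp_fn += len(gold_nes)
--     return tp, tp_fp, tp_fn
-- ===== Notes on version B (the rewrite author's own statement) =====
-- stated objective: alternative
-- what changed: get_name_entities is rewritten from A's nested while-loops (an inner scan that consumes each I-run and jumps the outer index) to a single flat enumerate pass that carries the currently-open entity (in_tag, tag, start) as state and flushes it at the end; the metrics loop is unchanged.
import Mathlib
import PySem

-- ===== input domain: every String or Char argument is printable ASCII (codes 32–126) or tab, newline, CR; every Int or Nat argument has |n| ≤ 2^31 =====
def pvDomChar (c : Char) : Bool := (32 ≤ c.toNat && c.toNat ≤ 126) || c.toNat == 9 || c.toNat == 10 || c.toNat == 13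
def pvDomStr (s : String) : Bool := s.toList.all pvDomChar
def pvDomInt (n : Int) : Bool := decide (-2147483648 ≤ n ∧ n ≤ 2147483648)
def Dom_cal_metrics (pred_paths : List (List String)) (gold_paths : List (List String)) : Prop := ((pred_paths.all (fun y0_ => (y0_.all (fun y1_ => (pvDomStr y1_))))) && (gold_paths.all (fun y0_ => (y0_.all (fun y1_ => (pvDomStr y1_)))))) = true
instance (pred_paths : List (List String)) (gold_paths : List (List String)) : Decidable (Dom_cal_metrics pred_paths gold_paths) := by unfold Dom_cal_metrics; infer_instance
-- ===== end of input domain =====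

-- B replaces A's nested while-loops (inner scan that consumes each I-run, then jumps the outer index)
-- by one flat pass that carries the currently-open entity as state; same return values (objective: alternative).

-- ===== PORT A =====
-- inner while of A: 'while j < length and path[j] == in_tag: j += 1' (returns final j);
-- fuel-based structural recursion: fuel = path.length always suffices since j only moves while j < length
def pvInnerA (path : List String) (in_tag : String) : Nat → Nat → Nat
  | 0, j => j
  | g + 1, j =>
    if j < path.length ∧ path.getD j "" = in_tag then pvInnerA path in_tag g (j + 1) else j

-- outer while of A's get_name_entities; fuel = path.length suffices since i strictly increases each step
def pvGoA (path : List String) : Nat → Nat → PySem.Set String → PySem.Set String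
  | 0, _, s => s
  | g + 1, i, s =>
    if i < path.length then
      let cur := path.getD i ""
      if PySem.Str.startswith cur "B-" then
        let tag := PySem.Str.slice cur (some 2) none
        let in_tag := PySem.Str.replace cur "B" "I"
        let j := pvInnerA path in_tag path.length (i + 1)
        pvGoA path g j (PySem.Set.add s (tag ++ "-" ++ PySem.Int.toStr i ++ "-" ++ PySem.Int.toStr j))
      else
        pvGoA path g (i + 1) s
    else s

def pvEntitiesA (path : List String) : PySem.Set String := pvGoA path path.length 0 PySem.Set.empty

def cal_metrics (pred_paths : List (List String)) (gold_paths : List (List String)) : Int × Int × Int :=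
  (pred_paths.zip gold_paths).foldl
    (fun (acc : Int × Int × Int) pg =>
      let pred_nes := pvEntitiesA pg.1
      let gold_nes := pvEntitiesA pg.2
      (acc.1 + PySem.Set.len (PySem.Set.inter pred_nes gold_nes),
       acc.2.1 + PySem.Set.len pred_nes,
       acc.2.2 + PySem.Set.len gold_nes))
    (0, 0, 0)

-- ===== PORT B =====
-- one flat pass over the path, carrying the open entity (in_tag, tag, start) as state;
-- k is the index of the head of the remaining list, the end-of-list flush uses k = len(path)
def pvScanB : List String → Nat → Option (String × String × Nat) → PySem.Set String → PySem.Set String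
  | [], k, op, s =>
    match op with
    | none => s
    | some (_, tg, st) => PySem.Set.add s (tg ++ "-" ++ PySem.Int.toStr st ++ "-" ++ PySem.Int.toStr k)
  | t :: rest, k, op, s =>
    match op with
    | some (it, tg, st) =>
      if t = it then
        pvScanB rest (k + 1) (some (it, tg, st)) s
      else
        let s' := PySem.Set.add s (tg ++ "-" ++ PySem.Int.toStr st ++ "-" ++ PySem.Int.toStr k)
        if PySem.Str.startswith t "B-" then
          pvScanB rest (k + 1) (some (PySem.Str.replace t "B" "I", PySem.Str.slice t (some 2) none, k)) s'
        else
          pvScanB rest (k + 1) none s'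
    | none =>
      if PySem.Str.startswith t "B-" then
        pvScanB rest (k + 1) (some (PySem.Str.replace t "B" "I", PySem.Str.slice t (some 2) none, k)) s
      else
        pvScanB rest (k + 1) none s

def pvEntitiesB (path : List String) : PySem.Set String := pvScanB path 0 none PySem.Set.empty

def cal_metrics_alt (pred_paths : List (List String)) (gold_paths : List (List String)) : Int × Int × Int :=
  (pred_paths.zip gold_paths).foldl
    (fun (acc : Int × Int × Int) pg =>
      let pred_nes := pvEntitiesB pg.1
      let gold_nes := pvEntitiesB pg.2
      (acc.1 + PySem.Set.len (PySem.Set.inter pred_nes gold_nes),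
       acc.2.1 + PySem.Set.len pred_nes,
       acc.2.2 + PySem.Set.len gold_nes))
    (0, 0, 0)

-- ===== PRECONDITION & SPEC =====
def Spec_cal_metrics (pred_paths : List (List String)) (gold_paths : List (List String)) (out : Int × Int × Int) : Prop := out = cal_metrics_alt pred_paths gold_paths
instance (pred_paths : List (List String)) (gold_paths : List (List String)) (out : Int × Int × Int) : Decidable (Spec_cal_metrics pred_paths gold_paths out) := by unfold Spec_cal_metrics; infer_instance

-- ===== CLAIM (what is proved, stated in full; the proofs are below) =====
def Claim_equal_cal_metrics : Prop := ∀ (pred_paths : List (List String)) (gold_paths : List (List String)), Dom_cal_metrics pred_paths gold_paths → Spec_cal_metrics pred_paths gold_paths (cal_metrics pred_paths gold_paths)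

-- ===== LEMMAS AND PROOFS =====

theorem pvInnerA_ge (path : List String) (it : String) :
    ∀ g j, j ≤ pvInnerA path it g j := by
  intro g
  induction g with
  | zero => intro j; exact le_refl j
  | succ g ih =>
    intro j
    rw [pvInnerA]
    split
    · exact le_trans (Nat.le_succ j) (ih (j + 1))
    · exact le_refl j

theorem pvInnerA_stop (path : List String) (it : String) (g j : Nat)
    (h : ¬ (j < path.length ∧ path.getD j "" = it)) : pvInnerA path it g j = j := by
  cases g with
  | zero => rfl
  | succ g => rw [pvInnerA, if_neg h]

theorem pvInnerA_fuel (path : List String) (it : String) :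
    ∀ g g' j, path.length - j ≤ g → path.length - j ≤ g' →
      pvInnerA path it g j = pvInnerA path it g' j := by
  intro g
  induction g with
  | zero =>
    intro g' j hg _
    have h : ¬ (j < path.length ∧ path.getD j "" = it) := by omega
    rw [pvInnerA_stop path it 0 j h, pvInnerA_stop path it g' j h]
  | succ g ih =>
    intro g' j hg hg'
    by_cases h : j < path.length ∧ path.getD j "" = it
    · cases g' with
      | zero => omega
      | succ g' =>
        rw [pvInnerA, if_pos h, pvInnerA, if_pos h]
        exact ih g' (j + 1) (by omega) (by omega)
    · rw [pvInnerA_stop path it _ j h, pvInnerA_stop path it g' j h]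

theorem pvGoA_stop (path : List String) (g i : Nat) (s : PySem.Set String)
    (h : ¬ i < path.length) : pvGoA path g i s = s := by
  cases g with
  | zero => rfl
  | succ g => rw [pvGoA, if_neg h]

theorem pvGoA_fuel (path : List String) :
    ∀ g g' i s, path.length - i ≤ g → path.length - i ≤ g' →
      pvGoA path g i s = pvGoA path g' i s := by
  intro g
  induction g with
  | zero =>
    intro g' i s hg _
    have h : ¬ i < path.length := by omega
    rw [pvGoA_stop path 0 i s h, pvGoA_stop path g' i s h]
  | succ g ih =>
    intro g' i s hg hg'
    by_cases h : i < path.length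
    · cases g' with
      | zero => omega
      | succ g' =>
        rw [pvGoA, if_pos h, pvGoA, if_pos h]
        by_cases hb : PySem.Str.startswith (path.getD i "") "B-" = true
        · simp only [hb, if_true]
          have hj := pvInnerA_ge path (PySem.Str.replace (path.getD i "") "B" "I") path.length (i + 1)
          exact ih g' _ _ (by omega) (by omega)
        · simp only [hb, Bool.false_eq_true, if_false]
          exact ih g' (i + 1) s (by omega) (by omega)
    · rw [pvGoA_stop path _ i s h, pvGoA_stop path g' i s h]

-- what B's state means in terms of A's loops (fuel = path.length, always sufficient)
def pvCloseA (path : List String) (k : Nat) (op : Option (String × String × Nat)) (s : PySem.Set String) : PySem.Set String :=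
  match op with
  | none => pvGoA path path.length k s
  | some (it, tg, st) =>
    let j := pvInnerA path it path.length k
    pvGoA path path.length j (PySem.Set.add s (tg ++ "-" ++ PySem.Int.toStr st ++ "-" ++ PySem.Int.toStr j))

theorem pvScanB_eq_close (path : List String) :
    ∀ n k op s, path.length - k ≤ n →
      pvScanB (path.drop k) k op s = pvCloseA path k op s := by
  intro n
  induction n with
  | zero =>
    intro k op s hn
    have hk : path.length ≤ k := by omega
    rw [List.drop_eq_nil_of_le hk]
    match op with
    | none =>
      simp only [pvScanB, pvCloseA]
      rw [pvGoA_stop path _ k s (by omega)]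
    | some (it, tg, st) =>
      simp only [pvScanB, pvCloseA]
      rw [pvInnerA_stop path it _ k (by omega)]
      rw [pvGoA_stop path _ k _ (by omega)]
  | succ n ih =>
    intro k op s hn
    by_cases hk : k < path.length
    · have hdrop : path.drop k = path[k] :: path.drop (k + 1) :=
        List.drop_eq_getElem_cons hk
      have hget : path.getD k "" = path[k] := List.getD_eq_getElem path "" hk
      obtain ⟨g, hg⟩ : ∃ g, path.length = g + 1 := ⟨path.length - 1, by omega⟩
      rw [hdrop]
      match op with
      | none =>
        simp only [pvScanB]
        by_cases hb : PySem.Str.startswith path[k] "B-"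
        · simp only [if_pos hb]
          rw [ih (k + 1) _ s (by omega)]
          simp only [pvCloseA]
          conv_rhs => rw [hg, pvGoA, if_pos (hg ▸ hk)]
          simp only [hget, if_pos hb]
          have hj := pvInnerA_ge path (PySem.Str.replace path[k] "B" "I") path.length (k + 1)
          rw [pvGoA_fuel path g path.length _ _ (by omega) (by omega)]
        · simp only [if_neg hb]
          rw [ih (k + 1) none s (by omega)]
          simp only [pvCloseA]
          conv_rhs => rw [hg, pvGoA, if_pos (hg ▸ hk)]
          simp only [hget, if_neg hb]
          rw [pvGoA_fuel path g path.length (k + 1) s (by omega) (by omega)]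
      | some (it, tg, st) =>
        simp only [pvScanB]
        by_cases heq : path[k] = it
        · simp only [if_pos heq]
          rw [ih (k + 1) (some (it, tg, st)) s (by omega)]
          simp only [pvCloseA]
          have : pvInnerA path it path.length k = pvInnerA path it path.length (k + 1) := by
            conv_lhs => rw [hg, pvInnerA, if_pos ⟨hk, hget.trans heq⟩]
            exact pvInnerA_fuel path it g path.length (k + 1) (by omega) (by omega)
          rw [this]
        · simp only [if_neg heq]
          have hj : pvInnerA path it path.length k = k := by
            refine pvInnerA_stop path it _ k ?_
            intro h; exact heq (hget ▸ h.2)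
          by_cases hb : PySem.Str.startswith path[k] "B-"
          · simp only [if_pos hb]
            rw [ih (k + 1) _ _ (by omega)]
            simp only [pvCloseA, hj]
            conv_rhs => rw [hg, pvGoA, if_pos (hg ▸ hk)]
            simp only [hget, if_pos hb]
            have hj2 := pvInnerA_ge path (PySem.Str.replace path[k] "B" "I") path.length (k + 1)
            rw [pvGoA_fuel path g path.length _ _ (by omega) (by omega)]
          · simp only [if_neg hb]
            rw [ih (k + 1) none _ (by omega)]
            simp only [pvCloseA, hj]
            conv_rhs => rw [hg, pvGoA, if_pos (hg ▸ hk)]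
            simp only [hget, if_neg hb]
            rw [pvGoA_fuel path g path.length (k + 1) _ (by omega) (by omega)]
    · exact ih k op s (by omega)

theorem pvEntities_eq (path : List String) : pvEntitiesA path = pvEntitiesB path := by
  have := pvScanB_eq_close path path.length 0 none PySem.Set.empty (by omega)
  simp only [List.drop_zero] at this
  unfold pvEntitiesA pvEntitiesB
  rw [this]
  rfl

-- ===== VERDICT (by name: the statement is the Claim_ definition above) =====
theorem cal_metrics_spec : Claim_equal_cal_metrics := by
  intro pred_paths gold_paths _
  unfold Spec_cal_metrics cal_metrics cal_metrics_alt
  simp only [pvEntities_eq]
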